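-- pv_equiv track=rewrite | github.com/CIhekweazu03/NIWCAResumeBuilder | llm_enhancer.py | parse_bio
-- ===== SOURCE A (Python) =====
-- def parse_bio(bio_text):
--     lines = bio_text.splitlines()
--     bio_content = ''
--     start_parsing = False
--     for line in lines:
--         line = line.strip()
--         if line == "### Professional Summary ###":
--             start_parsing = True
--             continue
--         elif start_parsing:
--             bio_content += line + ' '
--     return bio_content.strip()
-- ===== SOURCE B (Python) =====
-- MARKER = "### Professional Summary ###"
--
-- def parse_bio(bio_text):
--     lines = [ln.strip() for ln in bio_text.splitlines()]
--     if MARKER not in lines: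
--         return ''
--     after = lines[lines.index(MARKER) + 1:]
--     return ' '.join(ln for ln in after if ln != MARKER).strip()
-- ===== Notes on version B (the rewrite author's own statement) =====
-- stated objective: alternative
-- what changed: Replaces A's single-pass boolean-flag state machine with a locate-then-collect two-phase structure: strip all lines once, find the first marker with list.index, slice the lines after it, filter out repeated marker lines and join with spaces.
import Mathlib
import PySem

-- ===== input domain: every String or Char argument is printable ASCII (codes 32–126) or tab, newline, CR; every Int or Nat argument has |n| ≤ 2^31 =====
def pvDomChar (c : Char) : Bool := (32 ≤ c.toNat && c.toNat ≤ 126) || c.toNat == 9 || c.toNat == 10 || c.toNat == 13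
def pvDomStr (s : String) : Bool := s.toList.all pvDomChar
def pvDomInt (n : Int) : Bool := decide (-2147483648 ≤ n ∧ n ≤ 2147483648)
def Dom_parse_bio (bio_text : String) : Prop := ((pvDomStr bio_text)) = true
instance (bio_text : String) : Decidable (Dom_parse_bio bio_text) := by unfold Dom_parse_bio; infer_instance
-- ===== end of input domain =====

-- B replaces A's boolean-flag state machine by locate-the-marker-then-collect (index + slice + filter + join); alternative decomposition, same cost.

-- ===== PORT A =====
def parse_bio (bio_text : String) : String :=
  let lines := PySem.Str.splitlines bio_text
  let st := lines.foldl (fun (st : String × Bool) rawline =>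
    let line := PySem.Str.strip rawline
    if line = "### Professional Summary ###" then (st.1, true)
    else if st.2 = true then (st.1 ++ line ++ " ", st.2)
    else st) ("", false)
  PySem.Str.strip st.1

-- ===== PORT B =====
def parse_bio_alt (bio_text : String) : String :=
  let lines := (PySem.Str.splitlines bio_text).map PySem.Str.strip
  match PySem.List.index? lines "### Professional Summary ###" with
  | none => ""
  | some i =>
      let after := lines.drop (i + 1)
      PySem.Str.strip (PySem.Str.join " " (after.filter (fun ln => ln ≠ "### Professional Summary ###")))

-- ===== PRECONDITION & SPEC =====
def Spec_parse_bio (bio_text : String) (out : String) : Prop := out = parse_bio_alt bio_text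
instance (bio_text : String) (out : String) : Decidable (Spec_parse_bio bio_text out) := by unfold Spec_parse_bio; infer_instance

-- ===== CLAIM (what is proved, stated in full; the proofs are below) =====
def Claim_equal_parse_bio : Prop := ∀ (bio_text : String), Dom_parse_bio bio_text → Spec_parse_bio bio_text (parse_bio bio_text)

-- ===== LEMMAS AND PROOFS =====

def pvMarker : String := "### Professional Summary ###"

-- the concatenation A builds after the marker, over the already-stripped lines
def pvCatS : List String → String
  | [] => ""
  | x :: xs => x ++ " " ++ pvCatS xs

def pvStep (st : String × Bool) (line : String) : String × Bool :=
  if line = pvMarker then (st.1, true)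
  else if st.2 = true then (st.1 ++ line ++ " ", st.2)
  else st

theorem pvFold_true (M : List String) : ∀ (acc : String),
    M.foldl pvStep (acc, true) = (acc ++ pvCatS (M.filter (fun x => x ≠ pvMarker)), true) := by
  induction M with
  | nil => intro acc; simp [pvCatS]
  | cons x xs ih =>
    intro acc
    by_cases hx : x = pvMarker
    · simp [pvStep, hx, ih]
    · simp [pvStep, hx, ih, pvCatS, String.append_assoc]

theorem pvFold_false (M : List String) : ∀ (acc : String),
    M.foldl pvStep (acc, false) =
      match PySem.List.index? M pvMarker with
      | none => (acc, false)
      | some i => (acc ++ pvCatS ((M.drop (i + 1)).filter (fun x => x ≠ pvMarker)), true) := by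
  induction M with
  | nil => intro acc; simp [PySem.List.index?]
  | cons x xs ih =>
    intro acc
    by_cases hx : x = pvMarker
    · subst hx
      rw [PySem.List.index?_cons_self]
      simp [pvStep, pvFold_true]
    · simp only [PySem.List.index?_cons_of_ne _ hx]
      simp only [List.foldl_cons, pvStep, if_neg hx, Bool.false_eq_true, if_false]
      rw [ih acc]
      cases h : PySem.List.index? xs pvMarker <;> simp

theorem pvRstrip_append_space (l : List Char) :
    PySem.Chars.rstrip (l ++ [' ']) = PySem.Chars.rstrip l := by
  simp [PySem.Chars.rstrip, PySem.Chars.isspace]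

theorem pvStrip_append_space (s : String) :
    PySem.Str.strip (s ++ " ") = PySem.Str.strip s := by
  simp only [PySem.Str.strip, PySem.Chars.strip, String.toList_append]
  have h : (" " : String).toList = [' '] := by decide
  rw [h, PySem.Chars.lstrip, PySem.Chars.lstrip, List.dropWhile_append]
  split
  · next hall =>
      rw [List.isEmpty_iff.mp hall]
      simp [List.dropWhile, PySem.Chars.isspace, PySem.Chars.rstrip]
  · exact congrArg _ (pvRstrip_append_space _)

theorem pvJoin_singleton (x : String) : PySem.Str.join " " [x] = x := by
  simp [PySem.Str.join, PySem.Chars.join, List.intercalate]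

theorem pvJoin_cons_cons (x y : String) (ys : List String) :
    PySem.Str.join " " (x :: y :: ys) = x ++ " " ++ PySem.Str.join " " (y :: ys) := by
  apply String.ext
  simp [PySem.Str.join, PySem.Chars.join, List.intercalate]

theorem pvCatS_eq (F : List String) (h : F ≠ []) :
    pvCatS F = PySem.Str.join " " F ++ " " := by
  induction F with
  | nil => exact absurd rfl h
  | cons x xs ih =>
    cases xs with
    | nil => simp [pvCatS, pvJoin_singleton]
    | cons y ys =>
      show x ++ " " ++ pvCatS (y :: ys) = _
      rw [ih (by simp), pvJoin_cons_cons]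
      simp [String.append_assoc]

theorem pvCatS_eq_join (F : List String) :
    PySem.Str.strip (pvCatS F) = PySem.Str.strip (PySem.Str.join " " F) := by
  cases F with
  | nil => simp [pvCatS, PySem.Str.join, PySem.Chars.join, List.intercalate]
  | cons x xs => rw [pvCatS_eq _ (by simp), pvStrip_append_space]

-- ===== VERDICT (by name: the statement is the Claim_ definition above) =====
theorem parse_bio_spec : Claim_equal_parse_bio := by
  intro bio _
  unfold Spec_parse_bio parse_bio parse_bio_alt
  simp only []
  have hfold :
      (PySem.Str.splitlines bio).foldl (fun (st : String × Bool) rawline =>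
        let line := PySem.Str.strip rawline
        if line = "### Professional Summary ###" then (st.1, true)
        else if st.2 = true then (st.1 ++ line ++ " ", st.2)
        else st) ("", false)
      = ((PySem.Str.splitlines bio).map PySem.Str.strip).foldl pvStep ("", false) := by
    rw [List.foldl_map]
    rfl
  rw [hfold, pvFold_false]
  cases h : PySem.List.index? ((PySem.Str.splitlines bio).map PySem.Str.strip) pvMarker with
  | none =>
    have h' : PySem.List.index? ((PySem.Str.splitlines bio).map PySem.Str.strip)
        "### Professional Summary ###" = none := h
    rw [h']
    show PySem.Str.strip ("", false).1 = ""
    decide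
  | some i =>
    have h' : PySem.List.index? ((PySem.Str.splitlines bio).map PySem.Str.strip)
        "### Professional Summary ###" = some i := h
    rw [h']
    simp only [String.empty_append]
    exact pvCatS_eq_join _
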